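-- pv_equiv track=rewrite | github.com/ypzhang725/Longshot | emp-sh2pc/funcPy.py | computeBinJ
-- ===== SOURCE A (Python) =====
-- def computeBinJ(data, markers, sortDPd, j):
--     counter = sortDPd
--     size = len(data)
--     bins = [1] * size
--     # real records
--     for i in range(size):
--         bin_num = data[i] - 1
--         if markers[i] == 1 and bin_num == j and counter > 0:
--             bins[i] = 0
--             counter = counter - 1
--     # dummy records
--     for i in range(size):
--         if markers[i] == 2 and counter > 0:
--             bins[i] = 0
--             counter = counter - 1
--             continue
--     return bins
-- ===== SOURCE B (Python) =====
-- def computeBinJ(data, markers, sortDPd, j):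
--     size = len(data)
--     reals = [i for i in range(size) if markers[i] == 1 and data[i] - 1 == j]
--     dummies = [i for i in range(size) if markers[i] == 2]
--     chosen = set((reals + dummies)[:max(0, sortDPd)])
--     return [0 if i in chosen else 1 for i in range(size)]
-- ===== Notes on version B (the rewrite author's own statement) =====
-- stated objective: simpler
-- what changed: Replaces the two stateful counter-decrementing loops by comprehensions that collect the candidate indices (matching reals, then dummies), slices off the first max(0, sortDPd) of them, and builds the result as a single membership-test comprehension.
import Mathlib
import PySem

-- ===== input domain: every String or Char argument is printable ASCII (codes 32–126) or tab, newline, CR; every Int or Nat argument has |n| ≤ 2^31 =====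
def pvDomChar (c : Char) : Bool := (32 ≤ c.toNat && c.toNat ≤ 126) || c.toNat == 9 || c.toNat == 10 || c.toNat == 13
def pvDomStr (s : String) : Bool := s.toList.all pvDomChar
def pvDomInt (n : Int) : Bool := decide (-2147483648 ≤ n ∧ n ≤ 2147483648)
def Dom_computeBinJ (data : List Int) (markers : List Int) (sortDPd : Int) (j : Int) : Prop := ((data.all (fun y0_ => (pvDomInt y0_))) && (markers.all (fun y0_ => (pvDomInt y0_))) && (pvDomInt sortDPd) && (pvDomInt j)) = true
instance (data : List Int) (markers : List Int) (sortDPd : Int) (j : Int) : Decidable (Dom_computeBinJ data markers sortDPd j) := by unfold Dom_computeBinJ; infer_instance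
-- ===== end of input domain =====

-- B replaces A's two stateful counter loops by candidate-index comprehensions, a slice and a
-- membership-test comprehension (objective: simpler); equivalence proved under Pre_ (markers long enough).


-- ===== PORT A =====
def computeBinJ (data : List Int) (markers : List Int) (sortDPd : Int) (j : Int) : List Int :=
  let counter := sortDPd
  let size := data.length
  let bins : List Int := List.replicate size 1
  -- real records
  let s1 := (PySem.List.pyRange 0 (size : Int) 1).foldl
    (fun (s : List Int × Int) i =>
      let bin_num := PySem.List.pyGetD data i 0 - 1
      if PySem.List.pyGetD markers i 0 = 1 ∧ bin_num = j ∧ s.2 > 0 then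
        (PySem.List.pySetD s.1 i 0, s.2 - 1)
      else s) (bins, counter)
  -- dummy records
  let s2 := (PySem.List.pyRange 0 (size : Int) 1).foldl
    (fun (s : List Int × Int) i =>
      if PySem.List.pyGetD markers i 0 = 2 ∧ s.2 > 0 then
        (PySem.List.pySetD s.1 i 0, s.2 - 1)
      else s) s1
  s2.1

-- ===== PORT B =====
def computeBinJ_alt (data : List Int) (markers : List Int) (sortDPd : Int) (j : Int) : List Int :=
  let size := data.length
  let reals := (PySem.List.pyRange 0 (size : Int) 1).filter
    (fun i => PySem.List.pyGetD markers i 0 == 1 && PySem.List.pyGetD data i 0 - 1 == j)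
  let dummies := (PySem.List.pyRange 0 (size : Int) 1).filter
    (fun i => PySem.List.pyGetD markers i 0 == 2)
  let chosen := PySem.Set.ofList (PySem.List.slice (reals ++ dummies) none (some (max 0 sortDPd)))
  (PySem.List.pyRange 0 (size : Int) 1).map
    (fun i => if PySem.Set.contains chosen i then 0 else 1)

-- ===== PRECONDITION & SPEC =====
-- Pre_ excludes exactly the inputs where the Python A raises IndexError (markers shorter than data);
-- the Python B raises there too.
def Pre_computeBinJ (data : List Int) (markers : List Int) (_sortDPd : Int) (_j : Int) : Prop :=
  data.length ≤ markers.length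
instance (data : List Int) (markers : List Int) (sortDPd : Int) (j : Int) : Decidable (Pre_computeBinJ data markers sortDPd j) := by unfold Pre_computeBinJ; infer_instance
def pvWitness_computeBinJ : List Int × List Int × Int × Int := ([1, 2, 1], [1, 2, 1], 2, 0)

def Spec_computeBinJ (data : List Int) (markers : List Int) (sortDPd : Int) (j : Int) (out : List Int) : Prop := out = computeBinJ_alt data markers sortDPd j
instance (data : List Int) (markers : List Int) (sortDPd : Int) (j : Int) (out : List Int) : Decidable (Spec_computeBinJ data markers sortDPd j out) := by unfold Spec_computeBinJ; infer_instance

-- ===== CLAIM (what is proved, stated in full; the proofs are below) =====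
def Claim_equal_computeBinJ : Prop := ∀ (data : List Int) (markers : List Int) (sortDPd : Int) (j : Int), Dom_computeBinJ data markers sortDPd j → Pre_computeBinJ data markers sortDPd j → Spec_computeBinJ data markers sortDPd j (computeBinJ data markers sortDPd j)

-- ===== LEMMAS AND PROOFS =====

/-- Zero out the bins at a list of (Int) indices. -/
def pvSetZeros (bins : List Int) (t : List Int) : List Int :=
  t.foldl (fun b i => PySem.List.pySetD b i 0) bins

theorem pvSetZeros_cons (bins : List Int) (i : Int) (t : List Int) :
    pvSetZeros bins (i :: t) = pvSetZeros (PySem.List.pySetD bins i 0) t := rfl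

theorem pvSetZeros_append (bins : List Int) (t₁ t₂ : List Int) :
    pvSetZeros bins (t₁ ++ t₂) = pvSetZeros (pvSetZeros bins t₁) t₂ :=
  List.foldl_append

theorem length_pvSetZeros (t : List Int) (bins : List Int) :
    (pvSetZeros bins t).length = bins.length := by
  induction t generalizing bins with
  | nil => rfl
  | cons i t ih => rw [pvSetZeros_cons, ih, PySem.List.length_pySetD]

/-- One counter loop of A, characterised: it zeroes the first `c.toNat` indices of the
    filtered index list and decrements the counter by their number. -/
theorem pvLoop_char (P : Int → Bool) (l : List Int) (bins : List Int) (c : Int) :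
    l.foldl (fun (s : List Int × Int) i =>
        if P i = true ∧ s.2 > 0 then (PySem.List.pySetD s.1 i 0, s.2 - 1) else s) (bins, c)
      = (pvSetZeros bins ((l.filter P).take c.toNat),
         c - ((l.filter P).take c.toNat).length) := by
  induction l generalizing bins c with
  | nil => simp [pvSetZeros]
  | cons i l ih =>
    by_cases hP : P i = true
    · by_cases hc : c > 0
      · have htn : c.toNat = (c - 1).toNat + 1 := by omega
        rw [List.foldl_cons, if_pos (show P i = true ∧ c > 0 from ⟨hP, hc⟩), ih,
            List.filter_cons_of_pos hP, htn, List.take_succ_cons, pvSetZeros_cons,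
            Prod.mk.injEq]
        exact ⟨rfl, by simp only [List.length_cons]; push_cast; ring⟩
      · simp only [List.foldl_cons, List.filter_cons_of_pos hP]
        rw [if_neg (by tauto), ih]
        have htn : c.toNat = 0 := by omega
        simp [htn]
    · simp only [List.foldl_cons, List.filter_cons_of_neg hP]
      rw [if_neg (by tauto), ih]

theorem getElem?_pvSetZeros (t : List Int) (bins : List Int) (k : Nat) (hk : k < bins.length)
    (ht : ∀ i ∈ t, 0 ≤ i) :
    (pvSetZeros bins t)[k]? = if (k : Int) ∈ t then some 0 else bins[k]? := by
  induction t generalizing bins with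
  | nil => simp [pvSetZeros]
  | cons i t ih =>
    rw [pvSetZeros_cons]
    have hi : 0 ≤ i := ht i (by simp)
    rw [ih (PySem.List.pySetD bins i 0) (by rwa [PySem.List.length_pySetD])
        (fun x hx => ht x (by simp [hx]))]
    rw [PySem.List.pySetD_of_nonneg bins 0 hi, List.getElem?_set]
    by_cases hmem : (k : Int) ∈ t
    · simp [hmem]
    · by_cases heq : (k : Int) = i
      · have : i.toNat = k := by omega
        simp [heq, this, hk]
      · have hne : i.toNat ≠ k := by omega
        simp [hne, heq, hmem]

-- ===== VERDICT (by name: the statement is the Claim_ definition above) =====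
theorem computeBinJ_spec : Claim_equal_computeBinJ := by
  intro data markers sortDPd j _ _
  unfold Spec_computeBinJ computeBinJ computeBinJ_alt
  simp only []
  set n := data.length with hn
  set Pr : Int → Bool := fun i => PySem.List.pyGetD markers i 0 == 1 && PySem.List.pyGetD data i 0 - 1 == j with hPr
  set Pd : Int → Bool := fun i => PySem.List.pyGetD markers i 0 == 2 with hPd
  set R := PySem.List.pyRange 0 (n : Int) 1 with hR
  set reals := R.filter Pr with hreals
  set dummies := R.filter Pd with hdummies
  -- rewrite A's two loops via the characterisation
  have loop1 := pvLoop_char Pr R (List.replicate n 1) sortDPd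
  have e1 : R.foldl (fun (s : List Int × Int) i =>
      if PySem.List.pyGetD markers i 0 = 1 ∧ PySem.List.pyGetD data i 0 - 1 = j ∧ s.2 > 0 then
        (PySem.List.pySetD s.1 i 0, s.2 - 1) else s) (List.replicate n 1, sortDPd)
      = R.foldl (fun (s : List Int × Int) i =>
      if Pr i = true ∧ s.2 > 0 then (PySem.List.pySetD s.1 i 0, s.2 - 1) else s)
        (List.replicate n 1, sortDPd) := by
    have hf : (fun (s : List Int × Int) i =>
        if PySem.List.pyGetD markers i 0 = 1 ∧ PySem.List.pyGetD data i 0 - 1 = j ∧ s.2 > 0 then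
          (PySem.List.pySetD s.1 i 0, s.2 - 1) else s)
        = (fun (s : List Int × Int) i =>
        if Pr i = true ∧ s.2 > 0 then (PySem.List.pySetD s.1 i 0, s.2 - 1) else s) := by
      funext s i
      exact if_congr (by simp [hPr, and_assoc]) rfl rfl
    rw [hf]
  have e2 : ∀ (st : List Int × Int), R.foldl (fun (s : List Int × Int) i =>
      if PySem.List.pyGetD markers i 0 = 2 ∧ s.2 > 0 then
        (PySem.List.pySetD s.1 i 0, s.2 - 1) else s) st
      = R.foldl (fun (s : List Int × Int) i =>
      if Pd i = true ∧ s.2 > 0 then (PySem.List.pySetD s.1 i 0, s.2 - 1) else s) st := by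
    intro st
    have hf : (fun (s : List Int × Int) i =>
        if PySem.List.pyGetD markers i 0 = 2 ∧ s.2 > 0 then
          (PySem.List.pySetD s.1 i 0, s.2 - 1) else s)
        = (fun (s : List Int × Int) i =>
        if Pd i = true ∧ s.2 > 0 then (PySem.List.pySetD s.1 i 0, s.2 - 1) else s) := by
      funext s i
      exact if_congr (by simp [hPd]) rfl rfl
    rw [hf]
  set T1 := reals.take sortDPd.toNat with hT1
  set c1 := sortDPd - (T1.length : Int) with hc1
  set T2 := dummies.take c1.toNat with hT2
  rw [e1, e2, loop1, pvLoop_char]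
  -- the two taken segments together form the slice of candidates
  have hcat : T1 ++ T2 = (reals ++ dummies).take sortDPd.toNat := by
    rw [List.take_append]
    congr 1
    have hlen : T1.length = min sortDPd.toNat reals.length := by
      rw [hT1, List.length_take]
    rw [hT2]
    congr 1
    omega
  -- the slice in B
  have hslice : PySem.List.slice (reals ++ dummies) none (some (max 0 sortDPd))
      = (reals ++ dummies).take sortDPd.toNat := by
    rw [PySem.List.slice_to _ (le_max_left 0 sortDPd)]
    congr 1
    omega
  -- all chosen indices are nonneg and < n
  have hmemR : ∀ i ∈ T1 ++ T2, 0 ≤ i ∧ i < (n : Int) := by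
    intro i hi
    have : i ∈ reals ++ dummies := by
      rcases List.mem_append.1 hi with h | h
      · exact List.mem_append.2 (Or.inl (List.mem_of_mem_take h))
      · exact List.mem_append.2 (Or.inr (List.mem_of_mem_take h))
    have : i ∈ R := by
      rcases List.mem_append.1 this with h | h
      · exact List.mem_of_mem_filter h
      · exact List.mem_of_mem_filter h
    rw [hR, PySem.List.mem_pyRange_one] at this
    omega
  -- elementwise equality
  dsimp only
  rw [← hdummies, ← hT2, ← pvSetZeros_append]
  apply List.ext_getElem?
  intro k
  by_cases hkn : k < n
  · rw [getElem?_pvSetZeros (T1 ++ T2) (List.replicate n 1) k (by simpa using hkn)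
        (fun i hi => (hmemR i hi).1), List.getElem?_map, hR,
        PySem.List.getElem?_pyRange_one,
        if_pos (show k < ((n : Int) - 0).toNat by omega)]
    simp only [Option.map_some, zero_add]
    have hcontains : PySem.Set.contains
        (PySem.Set.ofList (PySem.List.slice (reals ++ dummies) none (some (max 0 sortDPd)))) (k : Int)
        = decide ((k : Int) ∈ T1 ++ T2) := by
      rw [hslice, ← hcat]
      simp only [PySem.Set.contains, List.contains_eq_mem, PySem.Set.mem_ofList]
    rw [hcontains]
    by_cases hm : (k : Int) ∈ T1 ++ T2
    · simp [hm]
    · simp [hm, hkn]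
  · have h1 : (pvSetZeros (List.replicate n (1 : Int)) (T1 ++ T2))[k]? = none := by
      rw [List.getElem?_eq_none_iff, length_pvSetZeros, List.length_replicate]
      omega
    rw [h1, Eq.comm, List.getElem?_eq_none_iff, List.length_map, hR,
        PySem.List.length_pyRange_one]
    omega
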